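-- pv_equiv track=rewrite | github.com/marquesernane086-png/ia-juricada | backend/services/reasoning_service.py | group_by_author
-- ===== SOURCE A (Python) =====
-- from typing import List, Dict, Optional
--
-- def group_by_author(results: List[Dict]) -> Dict[str, List[Dict]]:
--     """Group search results by author for doctrinal comparison."""
--     groups = {}
--     for result in results:
--         author = result.get("metadata", {}).get("author", "Autor Desconhecido")
--         if not author:
--             author = "Autor Desconhecido"
--         if author not in groups:
--             groups[author] = []
--         groups[author].append(result)
--     return groups
-- ===== SOURCE B (Python) =====
-- from typing import List, Dict
--
-- def group_by_author(results: List[Dict]) -> Dict[str, List[Dict]]: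
--     """Group search results by author for doctrinal comparison."""
--     def author_of(result):
--         a = result.get("metadata", {}).get("author", "Autor Desconhecido")
--         return a if a else "Autor Desconhecido"
--     authors = []
--     for r in results:
--         a = author_of(r)
--         if a not in authors:
--             authors.append(a)
--     return {a: [r for r in results if author_of(r) == a] for a in authors}
-- ===== Notes on version B (the rewrite author's own statement) =====
-- stated objective: alternative
-- what changed: Replaced the single-pass dict-of-lists accumulation with a two-phase decomposition: first collect the distinct authors in first-occurrence order, then build each group by filtering the results per author.
import Mathlib
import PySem

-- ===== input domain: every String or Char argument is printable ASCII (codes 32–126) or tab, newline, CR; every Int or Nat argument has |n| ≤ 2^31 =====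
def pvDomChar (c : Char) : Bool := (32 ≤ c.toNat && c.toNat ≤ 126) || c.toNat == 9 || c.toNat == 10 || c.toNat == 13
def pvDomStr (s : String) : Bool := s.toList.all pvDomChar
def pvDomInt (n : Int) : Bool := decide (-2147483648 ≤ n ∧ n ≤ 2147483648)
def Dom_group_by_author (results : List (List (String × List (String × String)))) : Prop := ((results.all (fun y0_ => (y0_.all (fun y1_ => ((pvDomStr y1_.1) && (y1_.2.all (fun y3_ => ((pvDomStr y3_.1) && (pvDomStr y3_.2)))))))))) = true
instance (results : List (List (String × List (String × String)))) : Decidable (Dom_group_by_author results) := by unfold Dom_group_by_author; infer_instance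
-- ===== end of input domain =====

-- B replaces the dict-of-lists accumulation by a two-phase decomposition (distinct authors, then one filter per author); same output, alternative structure.

-- ===== PORT A =====
def group_by_author (results : List (List (String × List (String × String)))) : List (String × List (List (String × List (String × String)))) :=
  (results.foldl
    (fun (groups : PySem.Dict String (List (List (String × List (String × String))))) result =>
      let author := (PySem.Dict.mk ((PySem.Dict.mk result).getD "metadata" [])).getD "author" "Autor Desconhecido"
      let author := if author = "" then "Autor Desconhecido" else author
      let groups := if groups.contains author then groups else groups.insert author []
      groups.modify author [] (fun l => l ++ [result]))
    PySem.Dict.empty).items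

-- ===== PORT B =====
def pvAuthorOf (result : List (String × List (String × String))) : String :=
  let a := (PySem.Dict.mk ((PySem.Dict.mk result).getD "metadata" [])).getD "author" "Autor Desconhecido"
  if a = "" then "Autor Desconhecido" else a

def pvAuthors (results : List (List (String × List (String × String)))) : List String :=
  results.foldl (fun acc r => let a := pvAuthorOf r; if a ∈ acc then acc else acc ++ [a]) []

def group_by_author_alt (results : List (List (String × List (String × String)))) : List (String × List (List (String × List (String × String)))) :=
  (pvAuthors results).map (fun a => (a, results.filter (fun r => pvAuthorOf r == a)))

-- ===== PRECONDITION & SPEC =====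
def Spec_group_by_author (results : List (List (String × List (String × String)))) (out : List (String × List (List (String × List (String × String))))) : Prop := out = group_by_author_alt results
instance (results : List (List (String × List (String × String)))) (out : List (String × List (List (String × List (String × String))))) : Decidable (Spec_group_by_author results out) := by
  unfold Spec_group_by_author
  haveI h1 : DecidableEq (List (List (String × List (String × String)))) := inferInstance
  infer_instance

-- ===== CLAIM (what is proved, stated in full; the proofs are below) =====
def Claim_equal_group_by_author : Prop := ∀ (results : List (List (String × List (String × String)))), Dom_group_by_author results → Spec_group_by_author results (group_by_author results)

-- ===== LEMMAS AND PROOFS =====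

abbrev pvRes := List (String × List (String × String))

-- generalized-accumulator fold used by pvAuthors
def pvAuthStep (acc : List String) (r : pvRes) : List String :=
  let a := pvAuthorOf r; if a ∈ acc then acc else acc ++ [a]

theorem pvAuthors_eq_foldl (rs : List pvRes) : pvAuthors rs = rs.foldl pvAuthStep [] := rfl

theorem pvAuthStep_subset {acc : List String} {a : String} (rs : List pvRes) (h : a ∈ acc) :
    a ∈ rs.foldl pvAuthStep acc := by
  induction rs generalizing acc with
  | nil => exact h
  | cons x xs ih =>
      apply ih
      by_cases h' : pvAuthorOf x ∈ acc <;> simp [pvAuthStep, h', h]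

theorem pv_mem_authors {r : pvRes} {rs : List pvRes} (acc : List String) (h : r ∈ rs) :
    pvAuthorOf r ∈ rs.foldl pvAuthStep acc := by
  induction rs generalizing acc with
  | nil => cases h
  | cons x xs ih =>
      rcases List.mem_cons.mp h with h' | h'
      · subst h'
        rw [List.foldl_cons]
        apply pvAuthStep_subset
        by_cases h2 : pvAuthorOf r ∈ acc <;> simp [pvAuthStep, h2]
      · exact ih _ h'

theorem pv_nodup_authors (rs : List pvRes) (acc : List String) (h : acc.Nodup) :
    (rs.foldl pvAuthStep acc).Nodup := by
  induction rs generalizing acc with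
  | nil => exact h
  | cons x xs ih =>
      apply ih
      by_cases h' : pvAuthorOf x ∈ acc
      · simpa [pvAuthStep, h'] using h
      · simp only [pvAuthStep, h', if_false, List.nodup_append]
        exact ⟨h, by simp, fun a ha => by simp; exact fun e => h' (e ▸ ha)⟩

def pvGmap (ks : List String) (rs : List pvRes) : List (String × List pvRes) :=
  ks.map (fun a => (a, rs.filter (fun r => pvAuthorOf r == a)))

def pvStepA (groups : PySem.Dict String (List pvRes)) (result : pvRes) : PySem.Dict String (List pvRes) :=
  (if groups.contains (pvAuthorOf result) then groups else groups.insert (pvAuthorOf result) []).modify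
    (pvAuthorOf result) [] (fun l => l ++ [result])

-- the port's inline fold step is definitionally pvStepA
theorem pv_foldl_eq (rs : List pvRes) :
    (rs.foldl
      (fun (groups : PySem.Dict String (List pvRes)) result =>
        let author := (PySem.Dict.mk ((PySem.Dict.mk result).getD "metadata" [])).getD "author" "Autor Desconhecido"
        let author := if author = "" then "Autor Desconhecido" else author
        let groups := if groups.contains author then groups else groups.insert author []
        groups.modify author [] (fun l => l ++ [result]))
      PySem.Dict.empty) = rs.foldl pvStepA PySem.Dict.empty := rfl

theorem pv_step (D : PySem.Dict String (List pvRes)) (ks : List String) (rs : List pvRes) (x : pvRes)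
    (hitems : D.items = pvGmap ks rs) (hnd : ks.Nodup) (hmem : ∀ r ∈ rs, pvAuthorOf r ∈ ks) :
    (pvStepA D x).items = pvGmap (pvAuthStep ks x) (rs ++ [x]) := by
  have hk : D.keys = ks := by
    simp [PySem.Dict.keys, hitems, pvGmap, Function.comp_def]
  have hgetD : ∀ k ∈ ks, D.getD k [] = rs.filter (fun r => pvAuthorOf r == k) := by
    intro k hkmem
    apply PySem.Dict.getD_of_mem_items
    · rw [hitems]
      exact List.mem_map.mpr ⟨k, hkmem, rfl⟩
    · rw [hk]; exact hnd
  by_cases ha : pvAuthorOf x ∈ ks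
  · have hc : D.contains (pvAuthorOf x) = true := by
      rw [PySem.Dict.contains_eq_decide_mem_keys, hk]; simpa
    have hs : pvStepA D x = D.modify (pvAuthorOf x) [] (fun l => l ++ [x]) := by
      simp only [pvStepA, hc, if_true]
    have hstep : pvAuthStep ks x = ks := by simp [pvAuthStep, ha]
    have hndm : (D.modify (pvAuthorOf x) [] (fun l => l ++ [x])).keys.Nodup := by
      rw [PySem.Dict.keys_modify, PySem.Dict.keys_insert_of_contains _ _ hc, hk]; exact hnd
    rw [hs, PySem.Dict.items_eq_map_keys _ hndm [], PySem.Dict.keys_modify,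
      PySem.Dict.keys_insert_of_contains _ _ hc, hk, hstep]
    unfold pvGmap
    apply List.map_congr_left
    intro k hkmem
    rw [PySem.Dict.getD_modify]
    by_cases hkeq : k = pvAuthorOf x
    · subst hkeq
      simp [hgetD _ hkmem, List.filter_append]
    · have : ¬ (pvAuthorOf x = k) := fun e => hkeq e.symm
      simp [hkeq, hgetD k hkmem, List.filter_append, this]
  · have hc : D.contains (pvAuthorOf x) = false := by
      rw [PySem.Dict.contains_eq_decide_mem_keys, hk]; simpa
    have hs : pvStepA D x = (D.insert (pvAuthorOf x) []).modify (pvAuthorOf x) [] (fun l => l ++ [x]) := by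
      simp only [pvStepA, hc]
      simp
    have hkins : (D.insert (pvAuthorOf x) []).keys = ks ++ [pvAuthorOf x] := by
      rw [PySem.Dict.keys_insert_of_not_contains _ _ hc, hk]
    have hc2 : (D.insert (pvAuthorOf x) []).contains (pvAuthorOf x) = true :=
      PySem.Dict.contains_insert_self _ _ _
    have hstep : pvAuthStep ks x = ks ++ [pvAuthorOf x] := by simp [pvAuthStep, ha]
    have hnd2 : (ks ++ [pvAuthorOf x]).Nodup := by
      simp only [List.nodup_append, List.nodup_cons, List.nodup_nil]
      exact ⟨hnd, ⟨by simp, by simp⟩, fun b hb => by simp; exact fun e => ha (e ▸ hb)⟩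
    have hndm : ((D.insert (pvAuthorOf x) []).modify (pvAuthorOf x) [] (fun l => l ++ [x])).keys.Nodup := by
      rw [PySem.Dict.keys_modify, PySem.Dict.keys_insert_of_contains _ _ hc2, hkins]; exact hnd2
    rw [hs, PySem.Dict.items_eq_map_keys _ hndm [], PySem.Dict.keys_modify,
      PySem.Dict.keys_insert_of_contains _ _ hc2, hkins, hstep]
    unfold pvGmap
    apply List.map_congr_left
    intro k hkmem
    rw [PySem.Dict.getD_modify]
    by_cases hkeq : k = pvAuthorOf x
    · subst hkeq
      have hfil : rs.filter (fun r => pvAuthorOf r == pvAuthorOf x) = [] := by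
        apply List.filter_eq_nil_iff.mpr
        intro r hr
        simp only [beq_iff_eq]
        exact fun e => ha (e ▸ hmem r hr)
      simp [PySem.Dict.getD_insert_self, List.filter_append, hfil]
    · have hks : k ∈ ks := by
        rcases List.mem_append.mp hkmem with h | h
        · exact h
        · exact absurd (List.mem_singleton.mp h) hkeq
      have : ¬ (pvAuthorOf x = k) := fun e => hkeq e.symm
      simp [hkeq, PySem.Dict.getD_insert_of_ne _ _ _ hkeq, hgetD k hks, List.filter_append, this]

theorem pv_inv (rs : List pvRes) :
    (rs.foldl pvStepA PySem.Dict.empty).items = pvGmap (pvAuthors rs) rs := by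
  induction rs using List.reverseRecOn with
  | nil => rfl
  | append_singleton rs x ih =>
      rw [List.foldl_append, List.foldl_cons, List.foldl_nil]
      rw [pvAuthors_eq_foldl, List.foldl_append, List.foldl_cons, List.foldl_nil]
      exact pv_step _ _ _ _ (by rw [ih, pvAuthors_eq_foldl]) (pv_nodup_authors rs [] (by simp))
        (fun r hr => pv_mem_authors [] hr)

-- ===== VERDICT (by name: the statement is the Claim_ definition above) =====
theorem group_by_author_spec : Claim_equal_group_by_author := by
  intro results _
  unfold Spec_group_by_author group_by_author group_by_author_alt
  rw [pv_foldl_eq]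
  exact pv_inv results
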